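-- pv_equiv track=rewrite | github.com/abant07/ccsbase2 | data.py | _calculate_charge
-- ===== SOURCE A (Python) =====
-- def _calculate_charge(adduct: str):
--     polarity = -1 if adduct[-1] == "-" else 1
--     charge = ""
--
--     for c in adduct[-2::-1]:
--         if c == "]":
--             break
--         charge = c + charge
--
--     if charge == "":
--         charge = 1
--
--     return int(charge) * polarity
-- ===== SOURCE B (Python) =====
-- def _calculate_charge(adduct: str):
--     polarity = -1 if adduct[-1] == "-" else 1
--     body = adduct[:-1]
--     charge = body[body.rfind("]") + 1:]
--     if charge == "":
--         charge = "1"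
--     return int(charge) * polarity
-- ===== Notes on version B (the rewrite author's own statement) =====
-- stated objective: simpler
-- what changed: Replaces A's explicit reverse-scan loop (iterating adduct[-2::-1] with a break at ']' while prepending characters) by computing the charge substring directly with one rfind and one slice of adduct[:-1].
import Mathlib
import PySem

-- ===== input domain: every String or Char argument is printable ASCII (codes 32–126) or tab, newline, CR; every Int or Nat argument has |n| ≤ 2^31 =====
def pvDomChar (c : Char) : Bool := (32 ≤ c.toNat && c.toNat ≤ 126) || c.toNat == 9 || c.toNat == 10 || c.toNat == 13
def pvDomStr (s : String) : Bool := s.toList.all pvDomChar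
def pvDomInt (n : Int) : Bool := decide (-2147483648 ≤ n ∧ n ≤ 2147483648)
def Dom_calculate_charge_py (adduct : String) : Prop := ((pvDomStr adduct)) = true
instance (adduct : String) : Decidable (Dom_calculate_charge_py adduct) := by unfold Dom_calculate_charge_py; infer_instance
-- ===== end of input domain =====

-- B replaces A's character-by-character reverse scan loop by rfind + one slice (objective: simpler).

-- ===== PORT A =====
-- the for-loop over adduct[-2::-1] with its break and the charge accumulator built by prepending
def pvA_loop : List Char → List Char → List Char
  | [], charge => charge
  | c :: rest, charge => if c = ']' then charge else pvA_loop rest (c :: charge)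

def calculate_charge_py (adduct : String) : Int :=
  let cs := adduct.toList
  -- adduct[-1] raises IndexError on "" and int(charge) raises ValueError when charge does not
  -- parse; both are excluded by Pre_, so the .getD defaults below are never reached under Pre_.
  let polarity : Int := if PySem.List.pyGet? cs (-1) = some '-' then -1 else 1
  let charge := pvA_loop ((PySem.List.slice? cs (some (-2)) none (-1)).getD []) []
  if charge = [] then 1 * polarity
  else (PySem.Int.ofChars? charge).getD 0 * polarity

-- ===== PORT B =====
def calculate_charge_py_alt (adduct : String) : Int :=
  let cs := adduct.toList
  let polarity : Int := if PySem.List.pyGet? cs (-1) = some '-' then -1 else 1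
  let body := PySem.List.slice cs none (some (-1))                                    -- adduct[:-1]
  let charge := PySem.List.slice body (some (PySem.Chars.rfind body [']'] + 1)) none  -- body[body.rfind("]")+1:]
  if charge = [] then 1 * polarity
  else (PySem.Int.ofChars? charge).getD 0 * polarity

-- ===== PRECONDITION & SPEC =====
-- Pre_ excludes exactly the inputs where the Python A raises: the empty string (IndexError on
-- adduct[-1]) and strings whose text after the last closing bracket of adduct[:-1] is non-empty
-- but not an int literal (ValueError in int(charge)).
def Pre_calculate_charge_py (adduct : String) : Prop :=
  adduct.toList ≠ [] ∧
  (let charge := (adduct.toList.dropLast.reverse.takeWhile (· ≠ ']')).reverse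
   charge = [] ∨ (PySem.Int.ofChars? charge).isSome)
instance (adduct : String) : Decidable (Pre_calculate_charge_py adduct) := by
  unfold Pre_calculate_charge_py; infer_instance
def pvWitness_calculate_charge_py : String := "[M+2H]2+"
def Spec_calculate_charge_py (adduct : String) (out : Int) : Prop := out = calculate_charge_py_alt adduct
instance (adduct : String) (out : Int) : Decidable (Spec_calculate_charge_py adduct out) := by
  unfold Spec_calculate_charge_py; infer_instance

-- ===== CLAIM (what is proved, stated in full; the proofs are below) =====
def Claim_equal_calculate_charge_py : Prop := ∀ (adduct : String), Dom_calculate_charge_py adduct → Pre_calculate_charge_py adduct → Spec_calculate_charge_py adduct (calculate_charge_py adduct)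

-- ===== LEMMAS AND PROOFS =====

-- A's loop collects, reversed back, the maximal ']'-free prefix of its (already reversed) input.
theorem pvA_loop_eq (r acc : List Char) :
    pvA_loop r acc = (r.takeWhile (· ≠ ']')).reverse ++ acc := by
  induction r generalizing acc with
  | nil => simp [pvA_loop]
  | cons c rest ih =>
    by_cases h : c = ']'
    · simp [pvA_loop, h]
    · simp [pvA_loop, h, ih, List.append_assoc]

theorem filterMap_range_eq_map (f : Nat → Option Char) (g : Nat → Char) (m : Nat)
    (h : ∀ k < m, f k = some (g k)) :
    List.filterMap f (List.range m) = List.map g (List.range m) := by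
  induction m with
  | zero => simp
  | succ n ih =>
    rw [List.range_succ, List.filterMap_append, List.map_append, ih (fun k hk => h k (by omega))]
    simp [h n (by omega)]

-- adduct[-2::-1] is the reverse of adduct[:-1]
theorem slice_neg_two_rev (xs : List Char) :
    PySem.List.slice? xs (some (-2)) none (-1) = some xs.dropLast.reverse := by
  simp only [PySem.List.slice?, PySem.List.sliceIndices]
  norm_num
  by_cases h : 1 < xs.length
  · rw [if_pos h]
    have hmax : max (-2 + (xs.length:Int)) (-1) = (xs.length:Int) - 2 := by omega
    rw [hmax]
    have hcnt : ((xs.length:Int) - 2 + 1).toNat = xs.length - 1 := by omega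
    rw [hcnt]
    rw [filterMap_range_eq_map _ (fun k => xs.getD (xs.length - 2 - k) ']') _ ?_]
    · apply List.ext_getElem
      · simp
      · intro i h1 h2
        simp only [List.getElem_map, List.getElem_range, List.getElem_reverse,
          List.getElem_dropLast]
        simp only [List.length_map, List.length_range] at h1
        have hi : xs.length - 2 - i < xs.length := by omega
        rw [List.getD_eq_getElem xs _ hi]
        congr 1
        simp only [List.length_dropLast]
        simp only [List.length_reverse, List.length_dropLast] at h2
        omega
    · intro k hk
      have ht : ((xs.length:Int) - 2 + -(k:Int)).toNat = xs.length - 2 - k := by omega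
      rw [ht]
      have hlt : xs.length - 2 - k < xs.length := by omega
      rw [List.getElem?_eq_getElem hlt]
      simp [List.getD_eq_getElem?_getD, List.getElem?_eq_getElem hlt]
  · rw [if_neg h]
    have : xs.dropLast.reverse.length = 0 := by simp; omega
    simp [List.eq_nil_of_length_eq_zero this]

theorem head?_isPrefixOf (t : List Char) :
    [']'].isPrefixOf t = true ↔ t.head? = some ']' := by
  cases t with
  | nil => simp
  | cons x xs =>
    show ((']' == x) && true) = true ↔ some x = some ']'
    rw [Bool.and_true, beq_iff_eq]
    exact ⟨fun h => by rw [← h], fun h => (Option.some_inj.mp h).symm⟩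

theorem go_zero (l : List Char) :
    PySem.Chars.rfind.go l [']'] 0 = if [']'].isPrefixOf l = true then 0 else -1 := rfl

theorem go_succ (l : List Char) (j : Nat) :
    PySem.Chars.rfind.go l [']'] (j+1)
      = if [']'].isPrefixOf (l.drop (j+1)) = true then ((j:Int)+1)
        else PySem.Chars.rfind.go l [']'] j := by
  show (if [']'].isPrefixOf (l.drop (j+1)) = true then ((j+1 : Nat) : Int)
        else PySem.Chars.rfind.go l [']'] j) = _
  push_cast
  rfl

-- characterization of rfind.go for the single-char needle "]"
theorem rfind_go_spec (l : List Char) (k : Nat) :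
    (PySem.Chars.rfind.go l [']'] k = -1 ∧ ∀ i ≤ k, l[i]? ≠ some ']') ∨
    (∃ j : Nat, j ≤ k ∧ PySem.Chars.rfind.go l [']'] k = (j : Int) ∧ l[j]? = some ']' ∧
      ∀ i, j < i → i ≤ k → l[i]? ≠ some ']') := by
  induction k with
  | zero =>
    by_cases h : l[0]? = some ']'
    · right
      refine ⟨0, le_refl _, ?_, h, by omega⟩
      rw [go_zero, if_pos ((head?_isPrefixOf l).mpr (by rw [← List.head?_drop] at h; simpa using h))]
      norm_num
    · left
      refine ⟨?_, fun i hi => ?_⟩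
      · rw [go_zero, if_neg]
        intro hc
        exact h (by rw [← List.head?_drop]; simpa using (head?_isPrefixOf _).mp hc)
      · have : i = 0 := by omega
        subst this; exact h
  | succ k ih =>
    by_cases h : l[k+1]? = some ']'
    · right
      refine ⟨k+1, le_refl _, ?_, h, by omega⟩
      rw [go_succ, if_pos ((head?_isPrefixOf _).mpr (by rw [List.head?_drop]; exact h))]
      push_cast; ring
    · have hgo : PySem.Chars.rfind.go l [']'] (k+1) = PySem.Chars.rfind.go l [']'] k := by
        rw [go_succ, if_neg]
        intro hc
        exact h (by rw [← List.head?_drop]; exact (head?_isPrefixOf _).mp hc)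
      rcases ih with ⟨he, hall⟩ | ⟨j, hjk, hval, hget, hnone⟩
      · left
        refine ⟨hgo.trans he, fun i hi => ?_⟩
        rcases Nat.lt_or_ge i (k+1) with hlt | hge
        · exact hall i (by omega)
        · have : i = k+1 := by omega
          subst this; exact h
      · right
        refine ⟨j, by omega, hgo.trans hval, hget, fun i h1 h2 => ?_⟩
        rcases Nat.lt_or_ge i (k+1) with hlt | hge
        · exact hnone i h1 (by omega)
        · have : i = k+1 := by omega
          subst this; exact h

theorem takeWhile_no_rbracket (xs ys : List Char) (h : ∀ x ∈ xs, x ≠ ']') :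
    (xs ++ ']' :: ys).takeWhile (· ≠ ']') = xs := by
  induction xs with
  | nil => simp
  | cons a t ih =>
    have ha : a ≠ ']' := h a (by simp)
    rw [List.cons_append, List.takeWhile_cons, ih (fun x hx => h x (List.mem_cons_of_mem _ hx))]
    simp [ha]

-- B's rfind + slice equals A's reverse scan, on any body list
theorem rfind_slice_eq (l : List Char) :
    PySem.List.slice l (some (PySem.Chars.rfind l [']'] + 1)) none
      = (l.reverse.takeWhile (· ≠ ']')).reverse := by
  rcases rfind_go_spec l l.length with ⟨he, hall⟩ | ⟨j, hjk, hval, hget, hnone⟩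
  · have hnomem : ∀ x ∈ l, x ≠ ']' := by
      intro x hx hc
      obtain ⟨i, hi, hix⟩ := List.getElem_of_mem hx
      exact hall i (by omega) (by rw [List.getElem?_eq_getElem hi, hix, hc])
    have hr : PySem.Chars.rfind l [']'] = -1 := he
    rw [PySem.Chars.rfind] at hr
    rw [PySem.Chars.rfind, hr]
    norm_num
    rw [List.takeWhile_eq_self_iff.mpr (by intro x hx; simpa using hnomem x (List.mem_reverse.mp hx))]
    simp
  · have hj : j < l.length := by
      by_contra hc
      rw [List.getElem?_eq_none (by omega)] at hget
      simp at hget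
    have hval' : PySem.Chars.rfind l [']'] = (j : Int) := hval
    rw [PySem.Chars.rfind] at hval'
    rw [PySem.Chars.rfind, hval']
    have hcast : (j : Int) + 1 = ((j + 1 : Nat) : Int) := by push_cast; ring
    rw [hcast, PySem.List.slice_from_natCast]
    have hsplit : l = l.take j ++ ']' :: l.drop (j+1) := by
      conv_lhs => rw [← List.take_append_drop j l]
      rw [List.drop_eq_getElem_cons hj]
      have : l[j] = ']' := by
        have := List.getElem?_eq_getElem hj
        rw [hget] at this
        exact (Option.some_inj.mp this).symm
      rw [this]
    have hnom : ∀ x ∈ (l.drop (j+1)).reverse, x ≠ ']' := by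
      intro x hx hc
      rw [List.mem_reverse] at hx
      obtain ⟨i, hi, hix⟩ := List.getElem_of_mem hx
      rw [List.getElem_drop] at hix
      have hlen : j + 1 + i < l.length := by
        rw [List.length_drop] at hi; omega
      exact hnone (j+1+i) (by omega) (by omega)
        (by rw [List.getElem?_eq_getElem hlen, hix, hc])
    conv_rhs => rw [hsplit]
    rw [List.reverse_append, List.reverse_cons, List.append_assoc, List.singleton_append,
      takeWhile_no_rbracket _ _ hnom, List.reverse_reverse]

-- the two charge computations agree on every input string
theorem charge_eq (cs : List Char) :
    pvA_loop ((PySem.List.slice? cs (some (-2)) none (-1)).getD []) []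
      = PySem.List.slice (PySem.List.slice cs none (some (-1)))
          (some (PySem.Chars.rfind (PySem.List.slice cs none (some (-1))) [']'] + 1)) none := by
  rw [slice_neg_two_rev, pvA_loop_eq, PySem.List.slice_to_neg_one, rfind_slice_eq]
  simp

-- ===== VERDICT (by name: the statement is the Claim_ definition above) =====
theorem calculate_charge_py_spec : Claim_equal_calculate_charge_py := by
  intro adduct _ _
  show calculate_charge_py adduct = calculate_charge_py_alt adduct
  simp only [calculate_charge_py, calculate_charge_py_alt]
  rw [charge_eq]
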